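-- pv_equiv track=rewrite | github.com/AmulyaJain123/ML-Sentiment | bow.py | train_simple_model
-- ===== SOURCE A (Python) =====
-- def create_feature_vector(review, vocabulary):
--     review_words = review.lower().split()
--     feature_vector = []
--     for word in vocabulary:
--         if word in review_words:
--             feature_vector.append(1)
--         else:
--             feature_vector.append(0)
--     return feature_vector
--
-- def train_simple_model(reviews, vocabulary):
--     positive_counts = [0] * len(vocabulary)
--     negative_counts = [0] * len(vocabulary)
--
--     for review, label in reviews:
--         feature_vector = create_feature_vector(review, vocabulary)
--         if label == 1:
--             for i in range(len(vocabulary)):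
--                 if feature_vector[i] == 1:
--                     positive_counts[i] += 1
--         else:
--             for i in range(len(vocabulary)):
--                 if feature_vector[i] == 1:
--                     negative_counts[i] += 1
--
--     return positive_counts, negative_counts
-- ===== SOURCE B (Python) =====
-- def train_simple_model(reviews, vocabulary):
--     pos_table = {}
--     neg_table = {}
--     for review, label in reviews:
--         words = set(review.lower().split())
--         table = pos_table if label == 1 else neg_table
--         for w in words:
--             table[w] = table.get(w, 0) + 1
--     positive_counts = [pos_table.get(w, 0) for w in vocabulary]
--     negative_counts = [neg_table.get(w, 0) for w in vocabulary]
--     return positive_counts, negative_counts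
-- ===== Notes on version B (the rewrite author's own statement) =====
-- stated objective: faster
-- what changed: B replaces A's per-review feature-vector construction and vocabulary-indexed increment loops with two word-keyed count dictionaries built in one pass over the reviews (incrementing per distinct word of each review), then projects the tables onto the vocabulary in a final pass.
import Mathlib
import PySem

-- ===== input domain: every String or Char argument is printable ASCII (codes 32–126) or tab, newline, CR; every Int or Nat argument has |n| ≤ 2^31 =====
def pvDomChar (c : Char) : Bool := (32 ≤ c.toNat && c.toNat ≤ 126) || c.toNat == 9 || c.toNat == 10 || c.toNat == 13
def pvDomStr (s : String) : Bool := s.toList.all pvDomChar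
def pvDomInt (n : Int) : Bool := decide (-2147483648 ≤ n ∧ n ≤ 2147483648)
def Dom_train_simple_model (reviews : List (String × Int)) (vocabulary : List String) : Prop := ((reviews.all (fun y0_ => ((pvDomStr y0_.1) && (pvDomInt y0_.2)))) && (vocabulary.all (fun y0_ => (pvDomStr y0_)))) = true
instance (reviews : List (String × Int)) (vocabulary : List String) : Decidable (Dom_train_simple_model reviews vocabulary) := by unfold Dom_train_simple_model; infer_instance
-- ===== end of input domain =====

-- B replaces A's per-review vocabulary-indexed increments with two word-keyed count tables built
-- in one pass and a final projection onto the vocabulary (objective: faster when the vocabulary is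
-- large relative to review length). Return-value equivalence only (neither mutates its arguments).

-- ===== PORT A =====
def create_feature_vector (review : String) (vocabulary : List String) : List Int :=
  let review_words := PySem.Str.split₀ (PySem.Str.lower review)
  vocabulary.foldl (fun fv word => fv ++ [if word ∈ review_words then (1 : Int) else 0]) []

-- the body of A's inner 'for i in range(len(vocabulary)): if feature_vector[i] == 1: counts[i] += 1'
def pvBump (fv : List Int) (cs : List Int) (i : Int) : List Int :=
  if PySem.List.pyGetD fv i 0 = 1 then cs.set i.toNat (PySem.List.pyGetD cs i 0 + 1) else cs

def train_simple_model (reviews : List (String × Int)) (vocabulary : List String) : List Int × List Int :=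
  let positive_counts := List.replicate vocabulary.length (0 : Int)
  let negative_counts := List.replicate vocabulary.length (0 : Int)
  reviews.foldl
    (fun acc rl =>
      let fv := create_feature_vector rl.1 vocabulary
      if rl.2 = 1 then
        ((PySem.List.pyRange 0 (vocabulary.length : Int) 1).foldl (pvBump fv) acc.1, acc.2)
      else
        (acc.1, (PySem.List.pyRange 0 (vocabulary.length : Int) 1).foldl (pvBump fv) acc.2))
    (positive_counts, negative_counts)

-- ===== PORT B =====
-- the body of B's inner 'for w in words: table[w] = table.get(w, 0) + 1'
def pvAddWord (d : PySem.Dict String Int) (w : String) : PySem.Dict String Int :=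
  d.insert w (d.getD w 0 + 1)

def train_simple_model_alt (reviews : List (String × Int)) (vocabulary : List String) : List Int × List Int :=
  let tables := reviews.foldl
    (fun t rl =>
      let words := PySem.Set.ofList (PySem.Str.split₀ (PySem.Str.lower rl.1))
      if rl.2 = 1 then (words.foldl pvAddWord t.1, t.2)
      else (t.1, words.foldl pvAddWord t.2))
    ((PySem.Dict.empty : PySem.Dict String Int), (PySem.Dict.empty : PySem.Dict String Int))
  (vocabulary.map (fun w => tables.1.getD w 0), vocabulary.map (fun w => tables.2.getD w 0))

-- ===== PRECONDITION & SPEC =====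
def Spec_train_simple_model (reviews : List (String × Int)) (vocabulary : List String) (out : List Int × List Int) : Prop := out = train_simple_model_alt reviews vocabulary
instance (reviews : List (String × Int)) (vocabulary : List String) (out : List Int × List Int) : Decidable (Spec_train_simple_model reviews vocabulary out) := by unfold Spec_train_simple_model; infer_instance

-- ===== CLAIM (what is proved, stated in full; the proofs are below) =====
def Claim_equal_train_simple_model : Prop := ∀ (reviews : List (String × Int)) (vocabulary : List String), Dom_train_simple_model reviews vocabulary → Spec_train_simple_model reviews vocabulary (train_simple_model reviews vocabulary)

-- ===== LEMMAS AND PROOFS =====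

theorem pvBump_length (fv cs : List Int) (i : Int) : (pvBump fv cs i).length = cs.length := by
  unfold pvBump; split <;> simp

theorem foldl_pvBump_length (fv : List Int) : ∀ (l : List Int) (cs : List Int),
    (l.foldl (pvBump fv) cs).length = cs.length := by
  intro l
  induction l with
  | nil => intro cs; rfl
  | cons i l ih => intro cs; simp [List.foldl_cons, ih, pvBump_length]

theorem foldl_pvBump_getD (fv : List Int) : ∀ (l : List Int) (cs : List Int) (j : Nat),
    l.Nodup → (∀ i ∈ l, 0 ≤ i) → j < cs.length →
    (l.foldl (pvBump fv) cs).getD j 0 =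
      cs.getD j 0 + (if (j : Int) ∈ l ∧ PySem.List.pyGetD fv (j : Int) 0 = 1 then 1 else 0) := by
  intro l
  induction l with
  | nil => intro cs j _ _ _; simp
  | cons i l ih =>
    intro cs j hnd hnn hj
    have hnn' : ∀ x ∈ l, (0:Int) ≤ x := fun x hx => hnn x (List.mem_cons_of_mem _ hx)
    have hi : (0:Int) ≤ i := hnn i (List.mem_cons_self ..)
    have hlen : j < (pvBump fv cs i).length := by rw [pvBump_length]; exact hj
    rw [List.foldl_cons, ih (pvBump fv cs i) j hnd.of_cons hnn' hlen]
    have hstep : (pvBump fv cs i).getD j 0 =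
        cs.getD j 0 + (if (j : Int) = i ∧ PySem.List.pyGetD fv (j : Int) 0 = 1 then 1 else 0) := by
      unfold pvBump
      by_cases hfv : PySem.List.pyGetD fv i 0 = 1
      · rw [if_pos hfv]
        have hset : (cs.set i.toNat (PySem.List.pyGetD cs i 0 + 1)).getD j 0 =
            if i.toNat = j then PySem.List.pyGetD cs i 0 + 1 else cs.getD j 0 := by
          simp [List.getD_eq_getElem?_getD, List.getElem?_set]
          split_ifs with h1 h2 <;> simp_all
        rw [hset]
        by_cases hij : (j : Int) = i
        · have : i.toNat = j := by omega
          rw [if_pos this]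
          rw [PySem.List.pyGetD_of_nonneg _ _ hi]
          have : i.toNat = j := this
          rw [this, if_pos ⟨hij, by rwa [hij]⟩]
        · have : ¬ i.toNat = j := by omega
          rw [if_neg this, if_neg (by tauto)]
          ring
      · rw [if_neg hfv]
        by_cases hij : (j : Int) = i
        · rw [if_neg (by rw [hij]; tauto)]; ring
        · rw [if_neg (by tauto)]; ring
    rw [hstep]
    simp only [List.mem_cons, PySem.List.pyGetD_natCast]
    have hnotboth : ¬((j : Int) = i ∧ (j : Int) ∈ l) :=
      fun h => (List.nodup_cons.mp hnd).1 (h.1 ▸ h.2)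
    by_cases hp : fv[j]?.getD 0 = 1
    · by_cases h1 : (j : Int) = i
      · subst h1
        have h2 : ((j : Nat) : Int) ∉ l := fun h => hnotboth ⟨rfl, h⟩
        simp [h2, hp]
      · by_cases h2 : (j : Int) ∈ l <;> simp [h1, h2, hp]
    · simp [hp]

-- A's inner loop over one review equals B's table update, projected onto the vocabulary.
theorem inner_loop_eq (r : String) (vocab : List String) (d : PySem.Dict String Int)
    (cs : List Int) (hcs : cs = vocab.map (fun w => d.getD w 0)) :
    (PySem.List.pyRange 0 (vocab.length : Int) 1).foldl
        (pvBump (create_feature_vector r vocab)) cs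
      = vocab.map (fun w =>
          ((PySem.Set.ofList (PySem.Str.split₀ (PySem.Str.lower r))).foldl pvAddWord d).getD w 0) := by
  have hlen : cs.length = vocab.length := by rw [hcs]; simp
  apply List.ext_getElem
  · rw [foldl_pvBump_length]; simp [hlen]
  · intro j hj1 hj2
    rw [foldl_pvBump_length, hlen] at hj1
    have hjcs : j < cs.length := by omega
    have hnd := PySem.List.nodup_pyRange_one (a := 0) (b := (vocab.length : Int))
    have hnn : ∀ i ∈ PySem.List.pyRange 0 (vocab.length : Int) 1, (0:Int) ≤ i := by
      intro i hi; exact ((PySem.List.mem_pyRange_one).mp hi).1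
    have hget := foldl_pvBump_getD (create_feature_vector r vocab)
      (PySem.List.pyRange 0 (vocab.length : Int) 1) cs j hnd hnn hjcs
    have hmemr : (j : Int) ∈ PySem.List.pyRange 0 (vocab.length : Int) 1 := by
      rw [PySem.List.mem_pyRange_one]; omega
    -- feature vector as a map
    have hfv : create_feature_vector r vocab =
        vocab.map (fun w => if w ∈ PySem.Str.split₀ (PySem.Str.lower r) then (1:Int) else 0) := by
      show vocab.foldl (fun fv word => fv ++ [if word ∈ PySem.Str.split₀ (PySem.Str.lower r) then (1:Int) else 0]) [] = _
      simpa using PySem.List.foldl_append_singleton_eq_map _ _ []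
    have hfvj : PySem.List.pyGetD (create_feature_vector r vocab) (j : Int) 0 =
        (if vocab[j] ∈ PySem.Str.split₀ (PySem.Str.lower r) then (1:Int) else 0) := by
      rw [hfv, PySem.List.pyGetD_of_nonneg _ _ (by positivity)]
      simp [List.getD_eq_getElem?_getD, Int.toNat_natCast, hj1]
    have hrhs : ((PySem.Set.ofList (PySem.Str.split₀ (PySem.Str.lower r))).foldl pvAddWord d).getD vocab[j] 0
        = d.getD vocab[j] 0 + (if vocab[j] ∈ PySem.Str.split₀ (PySem.Str.lower r) then (1:Int) else 0) := by
      unfold pvAddWord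
      rw [PySem.Dict.getD_foldl_insert_add_one]
      congr 1
      by_cases hm : vocab[j] ∈ PySem.Str.split₀ (PySem.Str.lower r)
      · rw [if_pos hm]
        have hmem' : vocab[j] ∈ PySem.Set.ofList (PySem.Str.split₀ (PySem.Str.lower r)) :=
          (PySem.Set.mem_ofList _ _).mpr hm
        exact_mod_cast List.count_eq_one_of_mem (PySem.Set.nodup_ofList _) hmem'
      · rw [if_neg hm]
        have hmem' : vocab[j] ∉ PySem.Set.ofList (PySem.Str.split₀ (PySem.Str.lower r)) := by
          rw [PySem.Set.mem_ofList]; exact hm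
        exact_mod_cast List.count_eq_zero_of_not_mem hmem'
    -- assemble, via getD = getElem on in-range indices
    have hlt : j < ((PySem.List.pyRange 0 (vocab.length : Int) 1).foldl
        (pvBump (create_feature_vector r vocab)) cs).length := by rw [foldl_pvBump_length]; omega
    have hL : ((PySem.List.pyRange 0 (vocab.length : Int) 1).foldl
        (pvBump (create_feature_vector r vocab)) cs).getD j 0 =
        ((PySem.List.pyRange 0 (vocab.length : Int) 1).foldl
        (pvBump (create_feature_vector r vocab)) cs)[j]'hlt := by
      simp [List.getD_eq_getElem?_getD, List.getElem?_eq_getElem hlt]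
    have hcsj : cs.getD j 0 = d.getD vocab[j] 0 := by
      rw [hcs]
      simp [List.getD_eq_getElem?_getD, List.getElem?_eq_getElem (by simpa using hj1 : j < (vocab.map (fun w => d.getD w 0)).length)]
    rw [← hL, hget, hcsj, hfvj]
    simp only [List.getElem_map]
    rw [hrhs]
    by_cases hm : vocab[j] ∈ PySem.Str.split₀ (PySem.Str.lower r) <;> simp [hm, hmemr]

theorem main_loop_eq (vocab : List String) : ∀ (reviews : List (String × Int))
    (pos neg : List Int) (dp dn : PySem.Dict String Int),
    pos = vocab.map (fun w => dp.getD w 0) → neg = vocab.map (fun w => dn.getD w 0) →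
    reviews.foldl
      (fun acc rl =>
        let fv := create_feature_vector rl.1 vocab
        if rl.2 = 1 then
          ((PySem.List.pyRange 0 (vocab.length : Int) 1).foldl (pvBump fv) acc.1, acc.2)
        else
          (acc.1, (PySem.List.pyRange 0 (vocab.length : Int) 1).foldl (pvBump fv) acc.2))
      (pos, neg)
    = (let t := reviews.foldl
        (fun t rl =>
          let words := PySem.Set.ofList (PySem.Str.split₀ (PySem.Str.lower rl.1))
          if rl.2 = 1 then (words.foldl pvAddWord t.1, t.2)
          else (t.1, words.foldl pvAddWord t.2)) (dp, dn)
       (vocab.map (fun w => t.1.getD w 0), vocab.map (fun w => t.2.getD w 0))) := by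
  intro reviews
  induction reviews with
  | nil => intro pos neg dp dn hp hn; simp [hp, hn]
  | cons rl rest ih =>
    intro pos neg dp dn hp hn
    simp only [List.foldl_cons]
    by_cases hl : rl.2 = 1
    · simp only [hl, if_true]
      exact ih _ _ _ _ (inner_loop_eq rl.1 vocab dp pos hp) hn
    · simp only [if_neg hl]
      exact ih _ _ _ _ hp (inner_loop_eq rl.1 vocab dn neg hn)

-- ===== VERDICT (by name: the statement is the Claim_ definition above) =====
theorem train_simple_model_spec : Claim_equal_train_simple_model := by
  intro reviews vocabulary _
  unfold Spec_train_simple_model train_simple_model train_simple_model_alt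
  have hinit : List.replicate vocabulary.length (0 : Int) =
      vocabulary.map (fun w => (PySem.Dict.empty : PySem.Dict String Int).getD w 0) := by
    simp [PySem.Dict.getD_empty, List.map_const']
  exact main_loop_eq vocabulary reviews _ _ _ _ hinit hinit
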